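-- pv_equiv track=rewrite | github.com/kritzerenkrieg/tapotalk | ResamplovadloFix.py | f
-- ===== SOURCE A (Python) =====
-- def f(var0: list) -> list:
--     var1 = len(var0)
--     var2 = [None] * (var1 << 1)
--
--     for var3 in range(var1):
--         var4 = var3 * 2
--         var2[var4] = var0[var3]
--         var2[var4 + 1] = var0[var3] >> 8
--
--     return var2
-- ===== SOURCE B (Python) =====
-- def f(var0: list) -> list:
--     # Divide and conquer: the interleaving of a concatenation is the
--     # concatenation of the interleavings, so split in half and recurse.
--     n = len(var0)
--     if n == 0:
--         return []
--     if n == 1: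
--         x = var0[0]
--         return [x, x >> 8]
--     mid = n // 2
--     return f(var0[:mid]) + f(var0[mid:])
-- ===== Notes on version B (the rewrite author's own statement) =====
-- stated objective: alternative
-- what changed: B replaces A's preallocated None-buffer filled by an interleaved-index loop with a divide-and-conquer recursion: split the list in half, recurse on each half, concatenate; correctness rests on interleave(xs++ys)=interleave(xs)++interleave(ys).
import Mathlib
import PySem

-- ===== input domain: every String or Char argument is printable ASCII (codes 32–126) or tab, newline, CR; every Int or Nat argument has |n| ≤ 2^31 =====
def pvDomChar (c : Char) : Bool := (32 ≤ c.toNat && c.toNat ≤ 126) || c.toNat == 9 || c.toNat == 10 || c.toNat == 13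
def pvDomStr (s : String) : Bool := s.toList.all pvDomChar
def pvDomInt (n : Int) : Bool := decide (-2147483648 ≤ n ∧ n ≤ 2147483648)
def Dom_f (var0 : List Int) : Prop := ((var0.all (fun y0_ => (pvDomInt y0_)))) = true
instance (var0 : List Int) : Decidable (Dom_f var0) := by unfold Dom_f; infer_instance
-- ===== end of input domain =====

-- B replaces A's preallocated buffer filled by an interleaved-index loop with a
-- divide-and-conquer recursion (split in half, recurse, concatenate); objective: alternative.

-- ===== PORT A =====
-- A preallocates [None] * (2n) and overwrites every slot; the placeholder is 0 here
-- (exact: every position 2i / 2i+1, i < n, is written by the loop).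
def f (var0 : List Int) : List Int :=
  let var1 : Int := (var0.length : Int)
  let var2 : List Int := List.replicate (var0.length * 2) 0
  (PySem.List.pyRange 0 var1 1).foldl
    (fun var2 var3 =>
      let var4 : Int := var3 * 2
      let x : Int := PySem.List.pyGetD var0 var3 0
      (var2.set var4.toNat x).set (var4 + 1).toNat (x >>> 8))
    var2

-- ===== PORT B =====
-- n // 2 on a nonnegative Int is the Nat division (needed by the port's termination proof).
theorem pv_floordiv_two (n : Nat) :
    PySem.Int.floordiv (n : Int) 2 = ((n / 2 : Nat) : Int) := by
  simp [PySem.Int.floordiv, Int.fdiv_eq_ediv]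

def f_alt (var0 : List Int) : List Int :=
  if var0.length = 0 then []
  else if var0.length = 1 then
    let x : Int := PySem.List.pyGetD var0 0 0
    [x, x >>> 8]
  else
    f_alt (PySem.List.slice var0 none (some (PySem.Int.floordiv ((var0.length : Int)) 2))) ++
      f_alt (PySem.List.slice var0 (some (PySem.Int.floordiv ((var0.length : Int)) 2)) none)
termination_by var0.length
decreasing_by
  · rw [pv_floordiv_two, PySem.List.slice_to_natCast]
    simp only [List.length_take]
    omega
  · rw [pv_floordiv_two, PySem.List.slice_from_natCast]
    simp only [List.length_drop]
    omega

-- ===== PRECONDITION & SPEC =====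
def Spec_f (var0 : List Int) (out : List Int) : Prop := out = f_alt var0
instance (var0 : List Int) (out : List Int) : Decidable (Spec_f var0 out) := by unfold Spec_f; infer_instance

-- ===== CLAIM (what is proved, stated in full; the proofs are below) =====
def Claim_equal_f : Prop := ∀ (var0 : List Int), Dom_f var0 → Spec_f var0 (f var0)

-- ===== LEMMAS AND PROOFS =====

-- The common specification both ports meet: each x contributes [x, x >> 8].
def pvInter (xs : List Int) : List Int := xs.flatMap (fun x : Int => [x, x >>> 8])

theorem pvInter_append (xs ys : List Int) :
    pvInter (xs ++ ys) = pvInter xs ++ pvInter ys := by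
  simp [pvInter]

theorem pvInter_length (xs : List Int) : (pvInter xs).length = xs.length * 2 := by
  induction xs with
  | nil => simp [pvInter]
  | cons a t ih => simp [pvInter] at *; omega

-- B equals the specification, by strong induction on the length.
theorem pv_falt_eq (xs : List Int) : f_alt xs = pvInter xs := by
  induction hn : xs.length using Nat.strong_induction_on generalizing xs with
  | _ n ih =>
  subst hn
  rw [f_alt]
  split
  · next h0 => simp [List.length_eq_zero_iff.mp h0, pvInter]
  · split
    · next h0 h1 =>
      obtain ⟨a, ha⟩ := List.length_eq_one_iff.mp h1
      subst ha
      simp [pvInter, PySem.List.pyGetD, PySem.List.pyGet?, PySem.List.pyIdx?]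
    · next h0 h1 =>
      rw [pv_floordiv_two, PySem.List.slice_to_natCast, PySem.List.slice_from_natCast]
      rw [ih (xs.take (xs.length / 2)).length (by simp; omega) _ rfl,
          ih (xs.drop (xs.length / 2)).length (by simp; omega) _ rfl,
          ← pvInter_append, List.take_append_drop]

theorem pvInter_append_singleton (xs : List Int) (x : Int) :
    pvInter (xs ++ [x]) = pvInter xs ++ [x, x >>> 8] := by
  simp [pvInter]

-- Loop invariant for A: after folding over range(k), the first 2k slots hold the
-- interleaving of the first k elements and the rest is still the placeholder.
theorem pv_f_inv (xs : List Int) (k : Nat) (hk : k ≤ xs.length) :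
    (PySem.List.pyRange 0 (k : Int) 1).foldl
      (fun var2 var3 =>
        let var4 : Int := var3 * 2
        let x : Int := PySem.List.pyGetD xs var3 0
        (var2.set var4.toNat x).set (var4 + 1).toNat (x >>> 8))
      (List.replicate (xs.length * 2) 0)
    = pvInter (xs.take k) ++ List.replicate ((xs.length - k) * 2) 0 := by
  induction k with
  | zero => simp [pvInter]
  | succ k ih =>
    have hk' : k ≤ xs.length := Nat.le_of_succ_le hk
    have hkk : k < xs.length := hk
    have hr : ((k : Int) + 1) = ((k + 1 : Nat) : Int) := by push_cast; ring
    rw [← hr, PySem.List.pyRange_one_succ_right (by positivity), List.foldl_append,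
      ih hk']
    simp only [List.foldl_cons, List.foldl_nil]
    have hget : PySem.List.pyGetD xs (k : Int) 0 = xs[k] := by
      simp [List.getElem?_eq_getElem hkk]
    have hlen : (pvInter (xs.take k)).length = k * 2 := by
      rw [pvInter_length, List.length_take, min_eq_left hk']
    have hmul : ((k : Int) * 2).toNat = k * 2 := by omega
    have hmul1 : ((k : Int) * 2 + 1).toNat = k * 2 + 1 := by omega
    have hrepl : xs.length - k = (xs.length - (k + 1)) + 1 := by omega
    rw [hget, hmul, hmul1]
    rw [List.set_append, if_neg (by omega), hlen]
    have h0 : k * 2 - k * 2 = 0 := by omega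
    rw [h0, hrepl]
    have hrl : ((xs.length - (k + 1)) + 1) * 2 = ((xs.length - (k + 1)) * 2 + 1) + 1 := by ring
    rw [hrl, List.replicate_succ, List.set_cons_zero]
    rw [List.set_append, if_neg (by omega), hlen]
    have h1 : k * 2 + 1 - k * 2 = 1 := by omega
    rw [h1, List.replicate_succ, List.set_cons_succ, List.set_cons_zero]
    have htake : xs.take (k + 1) = xs.take k ++ [xs[k]] := by
      rw [List.take_add_one]
      simp [List.getElem?_eq_getElem hkk]
    rw [htake, pvInter_append_singleton]
    simp

-- ===== VERDICT (by name: the statement is the Claim_ definition above) =====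
theorem f_spec : Claim_equal_f := by
  intro var0 _
  show f var0 = f_alt var0
  unfold f
  have := pv_f_inv var0 var0.length le_rfl
  simp only [] at this ⊢
  rw [this, pv_falt_eq]
  simp [pvInter]
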